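-- pv_equiv track=rewrite | github.com/dgoldman0/akashic | local_testing/test_sml.py | mstr2
-- ===== SOURCE A (Python) =====
-- def mstr2(s):
--     """Build Forth lines that construct string s in _UB using UC."""
--     parts = ['UR']
--     for ch in s:
--         parts.append(f'{ord(ch)} UC')
--
--     full = " ".join(parts)
--     lines = []
--     while len(full) > 70:
--         split_at = full.rfind(' ', 0, 70)
--         if split_at == -1:
--             split_at = 70
--         lines.append(full[:split_at])
--         full = full[split_at:].lstrip()
--     if full:
--         lines.append(full)
--     return lines
-- ===== SOURCE B (Python) =====
-- def mstr2(s):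
--     """Single-pass greedy word wrap over the token list (no repeated rfind/slicing)."""
--     words = ['UR']
--     for ch in s:
--         words.append(str(ord(ch)))
--         words.append('UC')
--     rem = sum(len(w) for w in words) + len(words) - 1  # len(" ".join(words))
--     lines = []
--     i = 0
--     while rem > 70:
--         cur = len(words[i])
--         j = i
--         while cur + 1 + len(words[j + 1]) <= 69:
--             cur += 1 + len(words[j + 1])
--             j += 1
--         lines.append(' '.join(words[i:j + 1]))
--         rem -= cur + 1
--         i = j + 1
--     lines.append(' '.join(words[i:]))
--     return lines
-- ===== Notes on version B (the rewrite author's own statement) =====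
-- stated objective: faster
-- what changed: A word-wraps by repeatedly calling rfind on and re-slicing the whole remaining string (quadratic); B makes one greedy pass over the token list, tracking the current line length and the remaining joined length.
import Mathlib
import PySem

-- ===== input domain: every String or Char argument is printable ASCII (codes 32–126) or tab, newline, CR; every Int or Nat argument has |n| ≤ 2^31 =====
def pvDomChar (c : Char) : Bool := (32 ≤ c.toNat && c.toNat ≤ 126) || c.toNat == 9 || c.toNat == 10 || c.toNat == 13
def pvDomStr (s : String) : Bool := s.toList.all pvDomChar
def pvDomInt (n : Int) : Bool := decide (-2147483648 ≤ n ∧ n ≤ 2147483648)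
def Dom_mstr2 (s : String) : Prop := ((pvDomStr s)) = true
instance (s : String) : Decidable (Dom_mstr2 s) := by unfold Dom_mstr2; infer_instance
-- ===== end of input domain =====

-- B replaces A's quadratic repeated rfind/slice/lstrip word-wrap of the joined string by a
-- single greedy pass over the token list that tracks the current line length (objective: faster).

-- ===== PORT A =====
-- the 'while len(full) > 70' loop; fuel = initial len(full)+1 suffices since full strictly shrinks each pass
def mstr2Loop : Nat → List Char → List (List Char) → (List (List Char) × List Char)
  | 0, full, lines => (lines, full)
  | fuel + 1, full, lines =>
    if full.length > 70 then
      let split_at := PySem.Chars.rfindFrom full [' '] 0 (some 70)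
      let split_at := if split_at = -1 then (70 : Int) else split_at
      mstr2Loop fuel (PySem.Chars.lstrip (PySem.Chars.slice full (some split_at) none))
        (lines ++ [PySem.Chars.slice full none (some split_at)])
    else (lines, full)

def mstr2 (s : String) : List String :=
  let parts := s.toList.foldl
    (fun ps ch => ps ++ [(PySem.Int.toChars (ch.toNat : Int)) ++ (' ' :: ['U', 'C'])]) [['U', 'R']]
  let full := PySem.Chars.join [' '] parts
  let p := mstr2Loop (full.length + 1) full []
  (if p.2 ≠ [] then p.1 ++ [p.2] else p.1).map String.ofList

-- ===== PORT B =====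
-- Source B's inner loop: extend the current line while the next word still fits (length stays ≤ 69)
def mstr2TakeLine : Nat → List Char → List (List Char) → (List Char × List (List Char))
  | _, line, [] => (line, [])
  | cur, line, w :: rest =>
    if cur + 1 + w.length ≤ 69 then mstr2TakeLine (cur + 1 + w.length) (line ++ ' ' :: w) rest
    else (line, w :: rest)

-- Source B's outer loop: while rem > 70 cut one line; then emit the remaining words as the last line
def mstr2WrapB (rem : Nat) (ws : List (List Char)) (lines : List (List Char)) : List (List Char) :=
  if rem > 70 then
    match ws with
    | [] => lines
    | w :: rest =>
      let p := mstr2TakeLine w.length w rest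
      mstr2WrapB (rem - (p.1.length + 1)) p.2 (lines ++ [p.1])
  else lines ++ [PySem.Chars.join [' '] ws]
termination_by rem
decreasing_by omega

def mstr2_alt (s : String) : List String :=
  let words := s.toList.foldl
    (fun ws ch => ws ++ [PySem.Int.toChars (ch.toNat : Int), ['U', 'C']]) [['U', 'R']]
  let rem := (words.map List.length).sum + words.length - 1
  (mstr2WrapB rem words []).map String.ofList

-- ===== PRECONDITION & SPEC =====
def Spec_mstr2 (s : String) (out : List String) : Prop := out = mstr2_alt s
instance (s : String) (out : List String) : Decidable (Spec_mstr2 s out) := by unfold Spec_mstr2; infer_instance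

-- ===== CLAIM (what is proved, stated in full; the proofs are below) =====
def Claim_equal_mstr2 : Prop := ∀ (s : String), Dom_mstr2 s → Spec_mstr2 s (mstr2 s)

-- ===== LEMMAS AND PROOFS =====

-- a word of the generated token stream: nonempty, short, no whitespace characters
def mstr2ValidW (w : List Char) : Bool :=
  !w.isEmpty && decide (w.length ≤ 69) && w.all (fun c => !PySem.Chars.isspace c)

def mstr2Valid (ws : List (List Char)) : Prop := ∀ w ∈ ws, mstr2ValidW w = true

theorem mstr2_validW_spec (w : List Char) (h : mstr2ValidW w = true) :
    w ≠ [] ∧ w.length ≤ 69 ∧ ∀ c ∈ w, PySem.Chars.isspace c = false := by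
  simp [mstr2ValidW] at h
  exact ⟨h.1.1, h.1.2, h.2⟩

theorem mstr2_valid_digits (n : Nat) (h : n ≤ 126) :
    mstr2ValidW (PySem.Int.toChars (n : Int)) = true := by
  have hall : (List.range 127).all (fun n => mstr2ValidW (PySem.Int.toChars (n : Int))) = true := by
    decide
  rw [List.all_eq_true] at hall
  exact hall n (List.mem_range.mpr (by omega))

theorem mstr2_join_append (xs ys : List (List Char)) (hx : xs ≠ []) (hy : ys ≠ []) :
    PySem.Chars.join [' '] (xs ++ ys) =
      PySem.Chars.join [' '] xs ++ ' ' :: PySem.Chars.join [' '] ys := by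
  induction xs with
  | nil => exact absurd rfl hx
  | cons x xs ih =>
    cases xs with
    | nil =>
        cases ys with
        | nil => exact absurd rfl hy
        | cons y ys' =>
          simp [PySem.Chars.join_cons_cons, PySem.Chars.join_singleton]
    | cons x' xs' =>
        have h := ih (by simp)
        simp only [List.cons_append] at h ⊢
        rw [PySem.Chars.join_cons_cons, PySem.Chars.join_cons_cons, h]
        simp

theorem mstr2_join_length (w : List Char) (rest : List (List Char)) :
    (PySem.Chars.join [' '] (w :: rest)).length =
      w.length + (rest.map (fun v => v.length + 1)).sum := by
  induction rest generalizing w with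
  | nil => simp [PySem.Chars.join_singleton]
  | cons v rest ih =>
    rw [PySem.Chars.join_cons_cons]
    simp only [List.length_append, List.map_cons, List.sum_cons, ih v]
    simp; omega

theorem mstr2_prefix_singleton (c : Char) (l : List Char) :
    [c].isPrefixOf l = true ↔ l.head? = some c := by
  cases l with
  | nil => simp [List.isPrefixOf]
  | cons x xs =>
    simp [List.isPrefixOf]
    exact eq_comm

-- rfind.go finds the highest occurrence
theorem mstr2_rfind_go (s : List Char) (L : Nat) :
    ∀ k, L ≤ k → ([' '].isPrefixOf (s.drop L) = true) →
      (∀ j, L < j → j ≤ k → [' '].isPrefixOf (s.drop j) = false) →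
      PySem.Chars.rfind.go s [' '] k = (L : Int) := by
  intro k
  induction k with
  | zero =>
    intro hL hP _
    have : L = 0 := Nat.le_zero.mp hL
    subst this
    simp only [List.drop_zero] at hP
    simp only [PySem.Chars.rfind.go, hP, if_true]
    norm_num
  | succ j ih =>
    intro hL hP hN
    by_cases hLe : L = j + 1
    · subst hLe
      simp only [PySem.Chars.rfind.go]
      simp only [hP, if_true]
    · have hL' : L ≤ j := by omega
      have hfalse : [' '].isPrefixOf (s.drop (j + 1)) = false :=
        hN (j + 1) (by omega) (le_refl _)
      simp only [PySem.Chars.rfind.go, hfalse]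
      simp only [Bool.false_eq_true, if_false]
      exact ih hL' hP (fun i h1 h2 => hN i h1 (by omega))

theorem mstr2_join_glue (l w : List Char) (pre : List (List Char)) :
    PySem.Chars.join [' '] ((l ++ ' ' :: w) :: pre) =
      l ++ ' ' :: PySem.Chars.join [' '] (w :: pre) := by
  cases pre with
  | nil => simp [PySem.Chars.join_singleton]
  | cons q pre' =>
    rw [PySem.Chars.join_cons_cons, PySem.Chars.join_cons_cons]
    simp

-- the greedy inner loop: it splits the word list, the line is the joined prefix, it stays ≤ 69,
-- and the first remaining word would not have fit
theorem mstr2_takeLine_spec : ∀ (ws : List (List Char)) (line : List Char), line ≠ [] →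
    ∃ pre, ws = pre ++ (mstr2TakeLine line.length line ws).2 ∧
      (mstr2TakeLine line.length line ws).1 = PySem.Chars.join [' '] (line :: pre) ∧
      (line.length ≤ 69 → (mstr2TakeLine line.length line ws).1.length ≤ 69) ∧
      (∀ w' rest', (mstr2TakeLine line.length line ws).2 = w' :: rest' →
        69 < (mstr2TakeLine line.length line ws).1.length + 1 + w'.length) := by
  intro ws
  induction ws with
  | nil =>
    intro line _
    exact ⟨[], by simp [mstr2TakeLine, PySem.Chars.join_singleton]⟩
  | cons w rest ih =>
    intro line hline
    by_cases hfit : line.length + 1 + w.length ≤ 69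
    · have hlen : (line ++ ' ' :: w).length = line.length + 1 + w.length := by simp; omega
      have hne : (line ++ ' ' :: w) ≠ [] := by simp
      obtain ⟨pre', h1, h2, h3, h4⟩ := ih (line ++ ' ' :: w) hne
      rw [hlen] at h1 h2 h3 h4
      have hunf : mstr2TakeLine line.length line (w :: rest) =
          mstr2TakeLine (line.length + 1 + w.length) (line ++ ' ' :: w) rest := by
        simp [mstr2TakeLine, hfit]
      refine ⟨w :: pre', ?_, ?_, ?_, ?_⟩
      · rw [hunf]; simpa using congrArg (w :: ·) h1
      · rw [hunf, h2, mstr2_join_glue, PySem.Chars.join_cons_cons]; simp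
      · intro _; rw [hunf]; exact h3 (by omega)
      · intro w' rest' hres; rw [hunf] at hres ⊢; exact h4 w' rest' hres
    · have hunf : mstr2TakeLine line.length line (w :: rest) = (line, w :: rest) := by
        simp [mstr2TakeLine, hfit]
      refine ⟨[], by simp [hunf], by simp [hunf, PySem.Chars.join_singleton], ?_, ?_⟩
      · intro h; simp [hunf]; omega
      · intro w' rest' hres
        rw [hunf] at hres ⊢
        have h5 : w = w' ∧ rest = rest' := by simpa using hres
        obtain ⟨rfl, rfl⟩ := h5
        simp; omega

-- (J (w'::rest2))[i]? is w'[i]? for i inside w'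
theorem mstr2_join_getElem (w' : List Char) (rest2 : List (List Char)) (i : Nat)
    (h : i < w'.length) : (PySem.Chars.join [' '] (w' :: rest2))[i]? = w'[i]? := by
  cases rest2 with
  | nil => simp [PySem.Chars.join_singleton]
  | cons q r =>
    rw [PySem.Chars.join_cons_cons]
    rw [List.append_assoc, List.getElem?_append_left h]

-- main loop equivalence on a valid word list
theorem mstr2_main : ∀ (n : Nat) (ws : List (List Char)) (lines : List (List Char)) (fuel : Nat),
    ws.length ≤ n → mstr2Valid ws → ws ≠ [] →
    (PySem.Chars.join [' '] ws).length + 1 ≤ fuel →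
    (mstr2Loop fuel (PySem.Chars.join [' '] ws) lines).1 ++
        [(mstr2Loop fuel (PySem.Chars.join [' '] ws) lines).2] =
      mstr2WrapB (PySem.Chars.join [' '] ws).length ws lines ∧
    (mstr2Loop fuel (PySem.Chars.join [' '] ws) lines).2 ≠ [] := by
  intro n
  induction n with
  | zero =>
    intro ws lines fuel hn hv hne _
    cases ws with
    | nil => exact absurd rfl hne
    | cons w rest => simp at hn
  | succ n ih =>
    intro ws lines fuel hn hv hne hfuel
    obtain ⟨w, rest, rfl⟩ : ∃ w rest, ws = w :: rest := by
      cases ws with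
      | nil => exact absurd rfl hne
      | cons w rest => exact ⟨w, rest, rfl⟩
    have hw := mstr2_validW_spec w (hv w (by simp))
    have hw1 : 1 ≤ w.length := List.length_pos_iff.mpr hw.1
    have hjlen := mstr2_join_length w rest
    cases fuel with
    | zero => omega
    | succ f =>
      by_cases hbig : (PySem.Chars.join [' '] (w :: rest)).length > 70
      · -- one wrap iteration on each side
        obtain ⟨pre, hsplit, hline, hle69, hstop⟩ := mstr2_takeLine_spec rest w hw.1
        set p := mstr2TakeLine w.length w rest with hp
        have hL69 : p.1.length ≤ 69 := hle69 hw.2.1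
        have hws : w :: rest = (w :: pre) ++ p.2 := by rw [hsplit]; simp
        have hp2ne : p.2 ≠ [] := by
          intro h
          rw [h, List.append_nil] at hws
          have := congrArg (fun l => (PySem.Chars.join [' '] l).length) hws
          simp only at this
          rw [← hline] at this
          omega
        obtain ⟨w', rest2, hp2⟩ : ∃ w' rest2, p.2 = w' :: rest2 := by
          cases h : p.2 with
          | nil => exact absurd h hp2ne
          | cons a b => exact ⟨a, b, rfl⟩
        have hw'mem : w' ∈ w :: rest := by
          rw [hws, hp2]; exact List.mem_append_right _ (by simp)
        have hw' := mstr2_validW_spec w' (hv w' hw'mem)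
        have hfit : 69 < p.1.length + 1 + w'.length := hstop w' rest2 hp2
        have hdecomp : PySem.Chars.join [' '] (w :: rest) =
            p.1 ++ ' ' :: PySem.Chars.join [' '] p.2 := by
          rw [hws, mstr2_join_append _ _ (by simp) hp2ne, hline]
        have hL1 : 1 ≤ p.1.length := by
          rw [hline, mstr2_join_length]; omega
        have hfulllen : (PySem.Chars.join [' '] (w :: rest)).length =
            p.1.length + 1 + (PySem.Chars.join [' '] p.2).length := by
          rw [hdecomp]; simp; omega
        -- the rfind of A lands exactly at the end of the greedy line
        have hgetL : (PySem.Chars.join [' '] (w :: rest))[p.1.length]? = some ' ' := by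
          rw [hdecomp, List.getElem?_append_right (le_refl _)]
          simp
        have hr : PySem.Chars.rfindFrom (PySem.Chars.join [' '] (w :: rest)) [' '] 0 (some 70)
            = (p.1.length : Int) := by
          have hlen70 : (List.take 70 (PySem.Chars.join [' '] (w :: rest))).length = 70 := by
            simp; omega
          have hgo : PySem.Chars.rfind.go (List.take 70 (PySem.Chars.join [' '] (w :: rest)))
              [' '] 70 = (p.1.length : Int) := by
            apply mstr2_rfind_go _ _ 70 (by omega)
            · rw [mstr2_prefix_singleton, List.head?_drop, List.getElem?_take]
              rw [if_pos (by omega)]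
              exact hgetL
            · intro j hLj hj70
              rw [Bool.eq_false_iff, Ne, mstr2_prefix_singleton, List.head?_drop,
                List.getElem?_take]
              by_cases hj : j < 70
              · rw [if_pos hj]
                rw [hdecomp, List.getElem?_append_right (by omega)]
                have hjl : j - p.1.length = (j - p.1.length - 1) + 1 := by omega
                rw [hjl]
                simp only [List.getElem?_cons_succ]
                rw [hp2, mstr2_join_getElem _ _ _ (by omega)]
                rw [List.getElem?_eq_getElem (by omega)]
                intro hc
                have hcmem : w'[j - p.1.length - 1] ∈ w' := List.getElem_mem _
                have := hw'.2.2 _ hcmem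
                rw [Option.some_inj.mp hc] at this
                exact absurd this (by decide)
              · rw [if_neg hj]; simp
          have h70 : ¬((PySem.Chars.join [' '] (w :: rest)).length : Int) < 70 := by
            omega
          simp only [PySem.Chars.rfindFrom, h70]
          norm_num
          rw [show ((70:Int).toNat) = 70 from rfl]
          simp only [PySem.Chars.rfind, hlen70, hgo]
          have : ((p.1.length : Int) = -1) = False := by simp
          simp [this]
        have hslice1 : PySem.Chars.slice (PySem.Chars.join [' '] (w :: rest)) none
            (some (p.1.length : Int)) = p.1 := by
          rw [PySem.Chars.slice_eq_listSlice, PySem.List.slice_to _ (Int.natCast_nonneg _)]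
          rw [Int.toNat_natCast, hdecomp, List.take_left]
        have hslice2 : PySem.Chars.lstrip (PySem.Chars.slice (PySem.Chars.join [' '] (w :: rest))
            (some (p.1.length : Int)) none) = PySem.Chars.join [' '] p.2 := by
          rw [PySem.Chars.slice_eq_listSlice, PySem.List.slice_from _ (Int.natCast_nonneg _)]
          rw [Int.toNat_natCast, hdecomp, List.drop_left]
          obtain ⟨c, w'', rfl⟩ : ∃ c w'', w' = c :: w'' := by
            cases h : w' with
            | nil => exact absurd h hw'.1
            | cons a b => exact ⟨a, b, rfl⟩
          have hcns : PySem.Chars.isspace c = false := hw'.2.2 c (by simp)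
          have hJ : ∃ t, PySem.Chars.join [' '] p.2 = c :: t := by
            rw [hp2]
            cases rest2 with
            | nil => exact ⟨w'', by simp [PySem.Chars.join_singleton]⟩
            | cons q r =>
              rw [PySem.Chars.join_cons_cons]
              exact ⟨w'' ++ [' '] ++ PySem.Chars.join [' '] (q :: r), by simp⟩
          obtain ⟨t, ht⟩ := hJ
          rw [ht]
          have hsp : PySem.Chars.isspace ' ' = true := by decide
          simp [PySem.Chars.lstrip, List.dropWhile, hcns, hsp]
        have stepA : mstr2Loop (f + 1) (PySem.Chars.join [' '] (w :: rest)) lines =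
            mstr2Loop f (PySem.Chars.join [' '] p.2) (lines ++ [p.1]) := by
          simp only [mstr2Loop, if_pos hbig, hr]
          have : (((p.1.length : Int) = -1) = False) := by simp
          simp only [this, if_false, hslice1, hslice2]
        have stepB : mstr2WrapB (PySem.Chars.join [' '] (w :: rest)).length (w :: rest) lines =
            mstr2WrapB (PySem.Chars.join [' '] p.2).length p.2 (lines ++ [p.1]) := by
          have harith : (PySem.Chars.join [' '] (w :: rest)).length - (p.1.length + 1) =
              (PySem.Chars.join [' '] p.2).length := by omega
          rw [mstr2WrapB, if_pos hbig]
          simp only [← hp, harith]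
        have hlenrest : p.2.length ≤ n := by
          have h1 := congrArg List.length hws
          have hn' := hn
          simp at h1 hn'
          omega
        have hvrest : mstr2Valid p.2 := by
          intro x hx
          exact hv x (by rw [hws]; exact List.mem_append_right _ hx)
        have hfuel' : (PySem.Chars.join [' '] p.2).length + 1 ≤ f := by omega
        obtain ⟨ihEq, ihNe⟩ := ih p.2 (lines ++ [p.1]) f hlenrest hvrest hp2ne hfuel'
        rw [stepA, stepB]
        exact ⟨ihEq, ihNe⟩
      · -- both emit the remaining words as the final line
        constructor
        · simp only [mstr2Loop, if_neg hbig]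
          rw [mstr2WrapB, if_neg hbig]
        · simp only [mstr2Loop, if_neg hbig]
          intro h
          have hlen0 := congrArg List.length h
          simp only [List.length_nil] at hlen0
          omega

-- foldl-append loops build the accumulator plus a map / flatMap
theorem mstr2_foldl_map (l : List Char) (acc : List (List Char)) (f : Char → List Char) :
    l.foldl (fun ps ch => ps ++ [f ch]) acc = acc ++ l.map f := by
  induction l generalizing acc with
  | nil => simp
  | cons c l ih => simp [ih]

theorem mstr2_foldl_flat (l : List Char) (acc : List (List Char)) (f g : Char → List Char) :
    l.foldl (fun ws ch => ws ++ [f ch, g ch]) acc = acc ++ l.flatMap (fun ch => [f ch, g ch]) := by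
  induction l generalizing acc with
  | nil => simp
  | cons c l ih => simp [ih]

-- A's two-word parts join to the same string as B's flattened word list
theorem mstr2_join_parts (l : List Char) (pref : List Char) (f : Char → List Char) :
    PySem.Chars.join [' '] (pref :: l.map (fun ch => f ch ++ ' ' :: ['U', 'C'])) =
      PySem.Chars.join [' '] (pref :: l.flatMap (fun ch => [f ch, ['U', 'C']])) := by
  induction l generalizing pref with
  | nil => rfl
  | cons c l ih =>
    simp only [List.map_cons, List.flatMap_cons, List.cons_append, List.nil_append]
    rw [PySem.Chars.join_cons_cons, PySem.Chars.join_cons_cons, mstr2_join_glue,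
      ih (['U', 'C'] : List Char), PySem.Chars.join_cons_cons]
    simp

theorem mstr2_sum (ws : List (List Char)) :
    (ws.map (fun v => v.length + 1)).sum = (ws.map List.length).sum + ws.length := by
  induction ws with
  | nil => simp
  | cons w ws ih => simp [ih]; omega

-- ===== VERDICT (by name: the statement is the Claim_ definition above) =====
theorem mstr2_spec : Claim_equal_mstr2 := by
  intro s hdom
  unfold Spec_mstr2 mstr2 mstr2_alt
  simp only [mstr2_foldl_map, mstr2_foldl_flat]
  simp only [List.cons_append, List.nil_append]
  set l := s.toList with hl
  set words : List (List Char) :=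
    ['U', 'R'] :: l.flatMap (fun ch => [PySem.Int.toChars (ch.toNat : Int), ['U', 'C']]) with hwords
  have hjoin : PySem.Chars.join [' ']
      (['U', 'R'] :: l.map (fun ch => PySem.Int.toChars (ch.toNat : Int) ++ ' ' :: ['U', 'C'])) =
      PySem.Chars.join [' '] words := mstr2_join_parts l _ _
  have hvalid : mstr2Valid words := by
    intro x hx
    rw [hwords] at hx
    rcases List.mem_cons.mp hx with h | h
    · subst h; decide
    · obtain ⟨ch, hch, hx2⟩ := List.mem_flatMap.mp h
      have hc : pvDomChar ch = true := by
        have := (List.all_eq_true.mp hdom) ch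
        exact this (by rwa [hl] at hch)
      have hle : ch.toNat ≤ 126 := by
        simp [pvDomChar] at hc
        omega
      rcases List.mem_cons.mp hx2 with h2 | h2
      · subst h2; exact mstr2_valid_digits ch.toNat hle
      · simp at h2; subst h2; decide
  have hrem : (words.map List.length).sum + words.length - 1 =
      (PySem.Chars.join [' '] words).length := by
    rw [hwords, mstr2_join_length, mstr2_sum]
    simp
    omega
  obtain ⟨hEq, hNe⟩ := mstr2_main words.length words []
    ((PySem.Chars.join [' '] words).length + 1) le_rfl hvalid (by rw [hwords]; simp) le_rfl
  rw [hjoin, hrem]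
  rw [if_pos hNe]
  rw [hEq]
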